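-- pv_equiv track=rewrite | github.com/onel6un/LeetCode_adventure | 242_Valid_Anagram.py | _get_dict_from_word
-- ===== SOURCE A (Python) =====
-- from typing import Dict
--
-- def _get_dict_from_word(word: str) -> Dict[str, str]:
--     dct_ltr = {}
--     for ltr in word:
--         if ltr in dct_ltr.keys():
--             dct_ltr[ltr] += 1
--         else:
--             dct_ltr[ltr] = 1
--     return dct_ltr
-- ===== SOURCE B (Python) =====
-- def _get_dict_from_word(word: str):
--     # Two-phase: dedup in first-occurrence order, then count each letter once.
--     letters = list(word)
--     return {ch: letters.count(ch) for ch in dict.fromkeys(letters)}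
-- ===== Notes on version B (the rewrite author's own statement) =====
-- stated objective: idiomatic
-- what changed: B replaces A's incremental membership-test-and-update dict loop by a two-phase comprehension: dedup the letters in first-occurrence order with dict.fromkeys, then count each distinct letter once with list.count.
import Mathlib
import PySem

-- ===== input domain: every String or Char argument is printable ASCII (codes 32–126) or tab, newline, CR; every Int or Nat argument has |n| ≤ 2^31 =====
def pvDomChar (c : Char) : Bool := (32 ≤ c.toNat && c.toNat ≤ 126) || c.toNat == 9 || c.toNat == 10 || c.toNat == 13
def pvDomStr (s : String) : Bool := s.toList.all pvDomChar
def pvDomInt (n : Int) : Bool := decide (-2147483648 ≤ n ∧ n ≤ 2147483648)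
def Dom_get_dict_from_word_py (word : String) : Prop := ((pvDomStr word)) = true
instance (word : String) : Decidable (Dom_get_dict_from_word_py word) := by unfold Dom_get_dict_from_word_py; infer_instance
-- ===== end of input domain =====

-- B replaces A's incremental membership-test-and-update dict loop by a two-phase
-- comprehension (dedup in first-occurrence order, then count each letter once); objective: idiomatic.

-- ===== PORT A =====
-- for ltr in word: the loop letters are 1-character strings.
def get_dict_from_word_py (word : String) : List (String × Int) :=
  ((word.toList.map (fun c => String.ofList [c])).foldl
    (fun d ltr =>
      if d.contains ltr then d.insert ltr (d.getD ltr 0 + 1)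
      else d.insert ltr 1)
    PySem.Dict.empty).items

-- ===== PORT B =====
def get_dict_from_word_py_alt (word : String) : List (String × Int) :=
  let letters := word.toList.map (fun c => String.ofList [c])
  (PySem.List.dedup letters).map (fun ch => (ch, (PySem.List.count letters ch : Int)))

-- ===== PRECONDITION & SPEC =====
def Spec_get_dict_from_word_py (word : String) (out : List (String × Int)) : Prop := out = get_dict_from_word_py_alt word
instance (word : String) (out : List (String × Int)) : Decidable (Spec_get_dict_from_word_py word out) := by unfold Spec_get_dict_from_word_py; infer_instance

-- ===== CLAIM (what is proved, stated in full; the proofs are below) =====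
def Claim_equal_get_dict_from_word_py : Prop := ∀ (word : String), Dom_get_dict_from_word_py word → Spec_get_dict_from_word_py word (get_dict_from_word_py word)

-- ===== LEMMAS AND PROOFS =====

-- if the key is absent, lookup gives none
theorem pv_get?_of_not_contains {κ ν : Type} [BEq κ] (d : PySem.Dict κ ν) (x : κ)
    (h : d.contains x = false) : d.get? x = none := by
  simp only [PySem.Dict.contains, List.any_eq_false] at h
  simp only [PySem.Dict.get?, Option.map_eq_none_iff, List.find?_eq_none]
  exact fun p hp => by simpa using h p hp

-- A's loop body is exactly the Counter update step
theorem pv_step_eq_modify {κ : Type} [BEq κ] (d : PySem.Dict κ Int) (x : κ) :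
    (if d.contains x then d.insert x (d.getD x 0 + 1) else d.insert x 1)
      = d.modify x 0 (· + 1) := by
  by_cases h : d.contains x = true
  · simp [h, PySem.Dict.modify]
  · have h' : d.contains x = false := by simpa using h
    simp [h', PySem.Dict.modify, PySem.Dict.getD, pv_get?_of_not_contains d x h']

-- ===== VERDICT (by name: the statement is the Claim_ definition above) =====
theorem get_dict_from_word_py_spec : Claim_equal_get_dict_from_word_py := by
  intro word _
  unfold Spec_get_dict_from_word_py get_dict_from_word_py get_dict_from_word_py_alt
  have hstep : (fun (d : PySem.Dict String Int) ltr =>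
      if d.contains ltr then d.insert ltr (d.getD ltr 0 + 1) else d.insert ltr 1)
      = (fun d x => d.modify x 0 (· + 1)) := by
    funext d x; exact pv_step_eq_modify d x
  rw [hstep, ← PySem.Dict.counter_eq_foldl, PySem.Dict.items_counter]
  simp [PySem.List.dedup_eq_ofList, PySem.List.count_eq]
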